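-- pv_equiv track=rewrite | github.com/wjs2063/Python-Coding-test- | Kakao/카카오(괄호변환).py | solution
-- ===== SOURCE A (Python) =====
-- def is_right_str(t):
--
--     stack=[]
--     stack.append(t[0])
--     for i in range(1,len(t)):
--         stack.append(t[i])
--         if len(stack)>1:
--             if stack[-1]==")" and stack[-2]=="(":
--                 stack.pop()
--                 stack.pop()
--
--     if stack:
--         return False
--     return True
--
-- def solution(p):
--     answer = ''
--     #1단계
--     u=""
--     v=""
--     if p=="" or is_right_str(p):
--         return p
--     #2단계
--     for i in range(1,len(p),2):
--         u=p[:i+1]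
--         v=p[i+1:]
--
--         if u.count("(")==u.count(")") and v.count("(")==v.count(")"):
--
--             break
--     if is_right_str(u):
--         return u+solution(v)
--     answer+="("+solution(v)+')'
--     u=u[1:-1]
--
--     for i in range(len(u)):
--         if u[i]=="(":
--             answer+=")"
--         else:
--             answer+="("
--
--     return answer
-- ===== SOURCE B (Python) =====
-- def _ok(t):
--     bal = 0
--     for ch in t:
--         if ch == "(":
--             bal += 1
--         elif ch == ")":
--             bal -= 1
--         else:
--             return False
--         if bal < 0:
--             return False
--     return bal == 0
--
--
-- def solution(p):
--     # Non-recursive: one pass collects every even position where the running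
--     # '('-')' balance is zero; those positions cut p into ALL the minimal
--     # count-balanced blocks of every recursion level of the spec at once
--     # (if the whole string is not count-balanced, it stays one block).
--     # Then a single right-to-left fold assembles the answer.
--     cuts = []
--     d = 0
--     for i, ch in enumerate(p):
--         if ch == "(":
--             d += 1
--         elif ch == ")":
--             d -= 1
--         if d == 0 and i % 2 == 1:
--             cuts.append(i + 1)
--     if cuts and cuts[-1] == len(p):
--         blocks = [p[a:b] for a, b in zip([0] + cuts, cuts)]
--     else:
--         blocks = [p] if p else []
--     out = ""
--     for u in reversed(blocks):
--         if _ok(u):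
--             out = u + out
--         else:
--             out = "(" + out + ")" + "".join(")" if c == "(" else "(" for c in u[1:-1])
--     return out
-- ===== Notes on version B (the rewrite author's own statement) =====
-- stated objective: faster
-- what changed: B is non-recursive: one left-to-right pass records every even position where the running '('-')' balance is zero, which cuts p into the blocks of ALL recursion levels of the spec at once (one block if p is not count-balanced), and a single right-to-left fold over those blocks assembles the answer, replacing A's recursion whose every level rescans both halves with str.count and a stack simulation.
-- outside the precondition, e.g. on solution('('): A raises IndexError, B returns '()'; on solution(')'): A raises IndexError, B returns '()'
import Mathlib
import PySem

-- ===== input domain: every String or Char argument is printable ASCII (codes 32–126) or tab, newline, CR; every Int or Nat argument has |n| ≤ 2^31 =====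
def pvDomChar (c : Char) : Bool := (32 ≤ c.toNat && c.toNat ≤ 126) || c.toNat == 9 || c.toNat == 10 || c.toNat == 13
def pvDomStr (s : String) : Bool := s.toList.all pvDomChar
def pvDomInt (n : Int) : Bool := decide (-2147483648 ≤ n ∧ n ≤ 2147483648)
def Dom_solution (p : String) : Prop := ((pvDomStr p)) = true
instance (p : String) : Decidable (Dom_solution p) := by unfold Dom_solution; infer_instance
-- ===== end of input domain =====

-- B is non-recursive: one pass collects every even position with zero running
-- '('-')' balance (the blocks of all recursion levels of A at once), then a
-- single right-to-left fold over the blocks assembles the answer.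

-- ===== PORT A =====
-- stack step of is_right_str's loop body: append, then maybe pop a "()" pair
-- (stack top is the list head here)
def pvStepA (st : List Char) (ch : Char) : List Char :=
  match ch :: st with
  | a :: b :: tl => if a = ')' ∧ b = '(' then tl else a :: b :: tl
  | st' => st'

def pvIsRightA (t : List Char) : Bool :=
  match t with
  | [] => false  -- Python raises IndexError (t[0]) here; unreachable from inputs in Pre_
  | c :: rest => (rest.foldl pvStepA [c]).isEmpty

-- the `for i in range(1, len(p), 2)` search with break; i ≥ 0 so p[:i+1]/p[i+1:]
-- are exactly take/drop of (i.toNat+1)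
def pvFindLoopA (p : List Char) : List Int → (List Char × List Char) → List Char × List Char
  | [], uv => uv
  | i :: rest, _ =>
    let u := p.take (i.toNat + 1)
    let v := p.drop (i.toNat + 1)
    if u.count '(' = u.count ')' ∧ v.count '(' = v.count ')' then (u, v)
    else pvFindLoopA p rest (u, v)

-- termination helper for pvSolA (the recursive call is on the v the loop returns)
lemma pvFindLoopA_v_lt (p : List Char) (hp : p ≠ []) :
    ∀ (idxs : List Int) (uv : List Char × List Char), uv.2.length < p.length →
      (pvFindLoopA p idxs uv).2.length < p.length := by
  intro idxs
  induction idxs with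
  | nil => intro uv h; simpa [pvFindLoopA] using h
  | cons i rest ih =>
    intro uv h
    have hlen : 0 < p.length := List.length_pos_iff.mpr hp
    simp only [pvFindLoopA]
    split
    · simp only [List.length_drop]; omega
    · exact ih _ (by simp only [List.length_drop]; omega)

def pvSolA (p : List Char) : List Char :=
  if h : p = [] ∨ pvIsRightA p = true then p
  else
    let uv := pvFindLoopA p (PySem.List.pyRange 1 p.length 2) ([], [])
    if pvIsRightA uv.1 = true then uv.1 ++ pvSolA uv.2
    else
      -- answer = "(" + solution(v) + ")", then u = u[1:-1] and the index loop flips chars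
      let u' := (uv.1.drop 1).dropLast
      (PySem.List.pyRange 0 u'.length 1).foldl
        (fun acc j => acc ++ [if PySem.List.pyGetD u' j ' ' = '(' then ')' else '('])
        ('(' :: pvSolA uv.2 ++ [')'])
termination_by p.length
decreasing_by
  all_goals
    exact pvFindLoopA_v_lt p (by rintro rfl; exact h (Or.inl rfl)) _ _
      (by simpa using List.length_pos_iff.mpr (by rintro rfl; exact h (Or.inl rfl)))

def solution (p : String) : String := String.mk (pvSolA p.toList)

-- ===== PORT B =====
-- _ok: one pass with a depth counter; foreign char or negative depth → False
def pvOkB : List Char → Int → Bool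
  | [], bal => bal == 0
  | ch :: rest, bal =>
    if ch = '(' then (if bal + 1 < 0 then false else pvOkB rest (bal + 1))
    else if ch = ')' then (if bal - 1 < 0 then false else pvOkB rest (bal - 1))
    else false

-- the `for i, ch in enumerate(p)` pass; state = (d, cuts); the enumerate index
-- is ≥ 0, so `(i+1).toNat` is exactly the Python int i+1 used as a cut position
def pvCutsB (p : List Char) : Int × List Nat :=
  (PySem.List.enumerate p 0).foldl
    (fun (st : Int × List Nat) pr =>
      let d := if pr.2 = '(' then st.1 + 1 else if pr.2 = ')' then st.1 - 1 else st.1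
      if d = 0 ∧ PySem.Int.mod pr.1 2 = 1 then (d, st.2 ++ [(pr.1 + 1).toNat])
      else (d, st.2))
    (0, [])

-- blocks = [p[a:b] for a, b in zip([0]+cuts, cuts)] (0 ≤ a ≤ b ≤ len: take/drop
-- is exact) if cuts reach len(p), else [p] (or [] for empty p)
def pvBlocksB (p : List Char) : List (List Char) :=
  let cuts := (pvCutsB p).2
  if cuts ≠ [] ∧ cuts.getLast? = some p.length then
    ((0 :: cuts).zip cuts).map (fun ab => (p.take ab.2).drop ab.1)
  else if p = [] then [] else [p]

-- `for u in reversed(blocks): out = …`; u[1:-1] = (u.drop 1).dropLast (exact)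
def pvSolB (p : List Char) : List Char :=
  (pvBlocksB p).reverse.foldl
    (fun out u =>
      if pvOkB u 0 then u ++ out
      else '(' :: out ++ ')' ::
        ((u.drop 1).dropLast).map (fun c => if c = '(' then ')' else '('))
    []

def solution_alt (p : String) : String := String.mk (pvSolB p.toList)

-- ===== PRECONDITION & SPEC =====
-- Pre_ excludes exactly the odd-length strings: on every odd-length input A's
-- recursion reaches the empty string and raises IndexError inside is_right_str;
-- A returns normally on every even-length input (any characters).
def Pre_solution (p : String) : Prop := p.toList.length % 2 = 0
instance (p : String) : Decidable (Pre_solution p) := by unfold Pre_solution; infer_instance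

def pvWitness_solution : String := "()(())"

def Spec_solution (p : String) (out : String) : Prop := out = solution_alt p
instance (p : String) (out : String) : Decidable (Spec_solution p out) := by unfold Spec_solution; infer_instance

-- ===== CLAIM (what is proved, stated in full; the proofs are below) =====
def Claim_equal_solution : Prop := ∀ (p : String), Dom_solution p → Pre_solution p → Spec_solution p (solution p)

-- ===== LEMMAS AND PROOFS =====

-- running balance of the length-k prefix
def pvD (p : List Char) (k : Nat) : Int :=
  ((p.take k).count '(' : Int) - ((p.take k).count ')' : Int)

-- closed form of B's cut positions
def pvCutsSpec (p : List Char) : List Nat :=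
  (List.range p.length).filterMap
    (fun i => if pvD p (i + 1) = 0 ∧ (i + 1) % 2 = 0 then some (i + 1) else none)

-- A's count condition at split position k (the loop tests it at k = i+1, i odd)
def pvCnd (p : List Char) (k : Nat) : Prop :=
  (p.take k).count '(' = (p.take k).count ')' ∧
    (p.drop k).count '(' = (p.drop k).count ')'

lemma pvStepA_nonclose (st : List Char) (ch : Char) (hc : ch ≠ ')') :
    pvStepA st ch = ch :: st := by
  cases st <;> simp [pvStepA, hc]

-- a stack whose bottom is ')' never empties
lemma pvStepA_getLast? (st : List Char) (ch : Char) (h : st.getLast? = some ')') :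
    (pvStepA st ch).getLast? = some ')' := by
  cases st with
  | nil => simp at h
  | cons a st₂ =>
    by_cases hc : ch = ')' ∧ a = '('
    · obtain ⟨rfl, rfl⟩ := hc
      simp only [pvStepA, reduceIte, and_self]
      cases st₂ with
      | nil => simp at h
      | cons b t => simpa [List.getLast?_cons_cons] using h
    · simp only [pvStepA, if_neg hc]
      simpa [List.getLast?_cons_cons] using h

lemma pvFold_getLast? (s : List Char) :
    ∀ st : List Char, st.getLast? = some ')' →
      (s.foldl pvStepA st).getLast? = some ')' := by
  induction s with
  | nil => intro st h; simpa using h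
  | cons c t ih => intro st h; exact ih _ (pvStepA_getLast? st c h)

-- a non-paren character in the stack is never removed
lemma pvStepA_mem (st : List Char) (ch x : Char) (hx1 : x ≠ '(') (hx2 : x ≠ ')')
    (hm : x ∈ st) : x ∈ pvStepA st ch := by
  cases st with
  | nil => simp at hm
  | cons a t =>
    by_cases hc : ch = ')' ∧ a = '('
    · obtain ⟨rfl, rfl⟩ := hc
      simp only [pvStepA, reduceIte, and_self]
      rcases List.mem_cons.mp hm with rfl | h
      · exact absurd rfl hx1
      · exact h
    · simp only [pvStepA, if_neg hc]
      exact List.mem_cons_of_mem _ hm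

lemma pvFold_mem (s : List Char) :
    ∀ (st : List Char) (x : Char), x ≠ '(' → x ≠ ')' → x ∈ st →
      x ∈ s.foldl pvStepA st := by
  induction s with
  | nil => intro st x _ _ h; simpa using h
  | cons c t ih => intro st x h1 h2 h; exact ih _ x h1 h2 (pvStepA_mem st c x h1 h2 h)

-- the stack test equals B's depth-counter test
lemma pvStack_okB : ∀ (s : List Char) (b : Nat),
    (s.foldl pvStepA (List.replicate b '(')).isEmpty = pvOkB s (b : Int) := by
  intro s
  induction s with
  | nil =>
    intro b
    cases b with
    | zero => simp [pvOkB]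
    | succ m => simp [pvOkB, List.isEmpty_iff]; omega
  | cons c t ih =>
    intro b
    by_cases hc : c = '('
    · subst hc
      have hstep : pvStepA (List.replicate b '(') '(' = List.replicate (b + 1) '(' := by
        rw [pvStepA_nonclose _ _ (by decide), List.replicate_succ]
      rw [List.foldl_cons, hstep]
      have := ih (b + 1)
      rw [this]
      have hneg : ¬((b : Int) + 1 < 0) := by omega
      simp only [pvOkB, reduceIte, if_neg hneg]
      norm_cast
    · by_cases hc2 : c = ')'
      · subst hc2
        cases b with
        | zero =>
          have hstep : pvStepA (List.replicate 0 '(') ')' = [')'] := by decide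
          rw [List.foldl_cons, hstep]
          have hl := pvFold_getLast? t [')'] (by simp)
          have hne : t.foldl pvStepA [')'] ≠ [] := by
            intro hnil; rw [hnil] at hl; simp at hl
          simp only [List.isEmpty_iff, pvOkB]
          norm_num
          simp [hne]
        | succ m =>
          have hstep : pvStepA (List.replicate (m + 1) '(') ')' = List.replicate m '(' := by
            rw [List.replicate_succ]
            simp [pvStepA]
          have hneg : ¬(((m + 1 : Nat) : Int) - 1 < 0) := by push_cast; omega
          have hrhs : pvOkB (')' :: t) ((m + 1 : Nat) : Int) = pvOkB t ((m : Nat) : Int) := by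
            simp only [pvOkB, reduceIte, if_neg hneg]
            congr 1
            push_cast; ring
          rw [List.foldl_cons, hstep, ih m, ← hrhs]
      · have hstep : pvStepA (List.replicate b '(') c = c :: List.replicate b '(' := by
          rw [pvStepA_nonclose _ _ hc2]
        rw [List.foldl_cons, hstep]
        have hmem := pvFold_mem t (c :: List.replicate b '(') c hc hc2 (by simp)
        have hne : t.foldl pvStepA (c :: List.replicate b '(') ≠ [] :=
          List.ne_nil_of_mem hmem
        simp only [List.isEmpty_iff, pvOkB]
        rw [if_neg hc, if_neg hc2]
        simp [hne]

lemma pvIsRightA_eq_okB (t : List Char) (hne : t ≠ []) :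
    pvIsRightA t = pvOkB t 0 := by
  cases t with
  | nil => exact absurd rfl hne
  | cons c rest =>
    have h0 : pvStepA [] c = [c] := by cases hc : c <;> simp [pvStepA]
    have : pvIsRightA (c :: rest) = ((c :: rest).foldl pvStepA []).isEmpty := by
      simp [pvIsRightA, h0]
    rw [this]
    have := pvStack_okB (c :: rest) 0
    simpa using this

-- the first index in the list satisfying A's count condition decides the loop
lemma pvFindLoopA_first (p : List Char) (i0 : Int) (l1 l2 : List Int)
    (h1 : ∀ j ∈ l1, ¬ pvCnd p (j.toNat + 1))
    (h0 : pvCnd p (i0.toNat + 1)) :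
    ∀ uv, pvFindLoopA p (l1 ++ i0 :: l2) uv = (p.take (i0.toNat + 1), p.drop (i0.toNat + 1)) := by
  induction l1 with
  | nil => intro uv; simp [pvFindLoopA, h0.1, h0.2]
  | cons j t ih =>
    intro uv
    have hj := h1 j (by simp)
    rw [pvCnd] at hj
    simp only [List.cons_append, pvFindLoopA, if_neg hj]
    exact ih (fun x hx => h1 x (by simp [hx])) _

-- if every index before the last fails, the loop falls through to the last split
lemma pvFindLoopA_all_fail (p : List Char) :
    ∀ (l : List Int) (j : Int) (uv : List Char × List Char),
      (∀ x ∈ l, ¬ pvCnd p (x.toNat + 1)) →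
      pvFindLoopA p (l ++ [j]) uv = (p.take (j.toNat + 1), p.drop (j.toNat + 1)) := by
  intro l
  induction l with
  | nil =>
    intro j uv _
    simp only [List.nil_append, pvFindLoopA]
    split
    · rfl
    · simp [pvFindLoopA]
  | cons x t ih =>
    intro j uv h
    have hx := h x (by simp)
    rw [pvCnd] at hx
    simp only [List.cons_append, pvFindLoopA, if_neg hx]
    exact ih j _ (fun y hy => h y (by simp [hy]))

-- A's loop returns the split at cut (the least admissible even position, or len)
lemma pvLoopA_spec (p : List Char) (cut : Nat)
    (hn2 : 2 ≤ p.length) (hnev : p.length % 2 = 0)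
    (hcut2 : 2 ≤ cut) (hcutlen : cut ≤ p.length) (hcutev : cut % 2 = 0)
    (hcutC : pvCnd p cut ∨ cut = p.length)
    (hmin : ∀ k, k % 2 = 0 → 2 ≤ k → k < cut → ¬ pvCnd p k) :
    pvFindLoopA p (PySem.List.pyRange 1 p.length 2) ([], []) = (p.take cut, p.drop cut) := by
  have hrange : PySem.List.pyRange 1 (p.length : Int) 2 =
      (List.range (p.length / 2)).map (fun k : Nat => (1 : Int) + 2 * (k : Int)) := by
    rw [PySem.List.pyRange_of_pos 1 (p.length : Int) (by norm_num)]
    rw [if_pos (by exact_mod_cast hn2)]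
    have h1 : (((p.length : Int) - 1 + 2 - 1) / 2).toNat = p.length / 2 := by omega
    rw [h1]
  by_cases hC : pvCnd p cut
  · -- break at index cut - 1
    have hkm : cut / 2 - 1 < p.length / 2 := by omega
    have hsplitN : p.length / 2 = (cut / 2 - 1) + ((p.length / 2 - (cut / 2 - 1) - 1) + 1) := by
      omega
    rw [hrange, hsplitN, List.range_add, List.range_succ_eq_map, List.map_append]
    simp only [List.map_cons, List.map_map]
    have hf0 : ((1 + 2 * ((cut / 2 - 1 : Nat) : Int)).toNat + 1) = cut := by omega
    have := pvFindLoopA_first p (1 + 2 * ((cut / 2 - 1 : Nat) : Int))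
      ((List.range (cut / 2 - 1)).map (fun k : Nat => (1 : Int) + 2 * (k : Int)))
      ((List.range (p.length / 2 - (cut / 2 - 1) - 1)).map
        (fun k : Nat => (1 : Int) + 2 * (((cut / 2 - 1) + Nat.succ k : Nat) : Int)))
      (by
        intro j hj
        rw [List.mem_map] at hj
        obtain ⟨k, hk, rfl⟩ := hj
        rw [List.mem_range] at hk
        have htn : ((1 + 2 * (k : Int)).toNat + 1) = 2 * k + 2 := by omega
        rw [htn]
        exact hmin (2 * k + 2) (by omega) (by omega) (by omega))
      (by rw [hf0]; exact hC) ([], [])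
    simp only [Function.comp_def, Nat.add_zero] at this ⊢
    rw [this, hf0]
  · -- no break: the loop falls through to the last index len - 1
    have hcn : cut = p.length := hcutC.resolve_left hC
    have hsplitN : p.length / 2 = (p.length / 2 - 1) + 1 := by omega
    rw [hrange, hsplitN, List.range_succ, List.map_append]
    have hf0 : ((1 + 2 * ((p.length / 2 - 1 : Nat) : Int)).toNat + 1) = p.length := by omega
    have := pvFindLoopA_all_fail p
      ((List.range (p.length / 2 - 1)).map (fun k : Nat => (1 : Int) + 2 * (k : Int)))
      (1 + 2 * ((p.length / 2 - 1 : Nat) : Int)) ([], [])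
      (by
        intro x hx
        rw [List.mem_map] at hx
        obtain ⟨k, hk, rfl⟩ := hx
        rw [List.mem_range] at hk
        have htn : ((1 + 2 * (k : Int)).toNat + 1) = 2 * k + 2 := by omega
        rw [htn]
        exact hmin (2 * k + 2) (by omega) (by omega) (by omega))
    simp only [List.map_cons, List.map_nil] at this ⊢
    rw [this, hf0, ← hcn]

-- ---- pvD facts ----

lemma pvD_zero (p : List Char) : pvD p 0 = 0 := by simp [pvD]

lemma pvD_take (p : List Char) (k j : Nat) (h : j ≤ k) :
    pvD (p.take k) j = pvD p j := by
  simp [pvD, List.take_take, Nat.min_eq_left h]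

lemma pvD_add (p : List Char) (cut : Nat) (hc : cut ≤ p.length) (j : Nat) :
    pvD p (cut + j) = pvD p cut + pvD (p.drop cut) j := by
  unfold pvD
  rw [List.take_add, List.count_append, List.count_append]
  have : (p.take cut).take cut = p.take cut := by simp [List.take_take]
  push_cast
  ring

-- pvCnd via pvD
lemma pvCnd_iff (p : List Char) (k : Nat) (hk : k ≤ p.length) :
    pvCnd p k ↔ (pvD p k = 0 ∧ pvD p p.length = 0) := by
  unfold pvCnd pvD
  have hsum1 : p.count '(' = (p.take k).count '(' + (p.drop k).count '(' := by
    conv_lhs => rw [← List.take_append_drop k p]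
    rw [List.count_append]
  have hsum2 : p.count ')' = (p.take k).count ')' + (p.drop k).count ')' := by
    conv_lhs => rw [← List.take_append_drop k p]
    rw [List.count_append]
  simp only [List.take_length]
  omega

-- ---- characterization of pvOkB ----

lemma pvD_cons_succ (c : Char) (s : List Char) (k : Nat) :
    pvD (c :: s) (k + 1) =
      (if c = '(' then 1 else if c = ')' then -1 else 0) + pvD s k := by
  unfold pvD
  rw [List.take_succ_cons, List.count_cons, List.count_cons]
  by_cases h1 : c = '(' <;> by_cases h2 : c = ')' <;>
    simp_all <;> push_cast <;> ring

lemma pvOkB_char : ∀ (s : List Char) (b : Int), 0 ≤ b →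
    (pvOkB s b = true ↔
      ((∀ k, k ≤ s.length → 0 ≤ b + pvD s k) ∧ b + pvD s s.length = 0 ∧
        ∀ c ∈ s, c = '(' ∨ c = ')')) := by
  intro s
  induction s with
  | nil =>
    intro b hb
    simp only [pvOkB, List.length_nil, List.not_mem_nil]
    constructor
    · intro h
      refine ⟨?_, ?_, by simp⟩
      · intro k hk
        interval_cases k
        simp [pvD_zero]; omega
      · simp only [beq_iff_eq] at h; simp [pvD_zero, h]
    · intro ⟨_, h2, _⟩
      simp only [pvD_zero] at h2
      simp only [beq_iff_eq]; omega
  | cons c t ih =>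
    intro b hb
    by_cases h1 : c = '('
    · subst h1
      have hneg : ¬(b + 1 < 0) := by omega
      simp only [pvOkB, reduceIte, if_neg hneg]
      rw [ih (b + 1) (by omega)]
      constructor
      · intro ⟨ha, hf, hc⟩
        refine ⟨?_, ?_, ?_⟩
        · intro k hk
          cases k with
          | zero => simp [pvD_zero]; omega
          | succ m =>
            have := ha m (by simpa using hk)
            rw [pvD_cons_succ]; simp only [reduceIte]; omega
        · rw [List.length_cons, pvD_cons_succ]; simp only [reduceIte]; omega
        · intro x hx
          rcases List.mem_cons.mp hx with rfl | h
          · exact Or.inl rfl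
          · exact hc x h
      · intro ⟨ha, hf, hc⟩
        refine ⟨?_, ?_, fun x hx => hc x (List.mem_cons_of_mem _ hx)⟩
        · intro k hk
          have := ha (k + 1) (by simpa using hk)
          rw [pvD_cons_succ] at this; simp only [reduceIte] at this; omega
        · rw [List.length_cons, pvD_cons_succ] at hf; simp only [reduceIte] at hf; omega
    · by_cases h2 : c = ')'
      · subst h2
        by_cases hbz : b = 0
        · subst hbz
          have hneg : (0 : Int) - 1 < 0 := by omega
          simp only [pvOkB, if_neg h1, reduceIte, if_pos hneg]
          constructor
          · intro h; cases h
          · intro ⟨ha, _, _⟩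
            have := ha 1 (by simp)
            rw [show (1 : Nat) = 0 + 1 from rfl, pvD_cons_succ] at this
            simp only [if_neg h1, reduceIte, pvD_zero] at this
            omega
        · have hneg : ¬(b - 1 < 0) := by omega
          simp only [pvOkB, if_neg h1, reduceIte, if_neg hneg]
          rw [ih (b - 1) (by omega)]
          constructor
          · intro ⟨ha, hf, hc⟩
            refine ⟨?_, ?_, ?_⟩
            · intro k hk
              cases k with
              | zero => simp [pvD_zero]; omega
              | succ m =>
                have := ha m (by simpa using hk)
                rw [pvD_cons_succ]; simp only [if_neg h1, reduceIte]; omega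
            · rw [List.length_cons, pvD_cons_succ]; simp only [if_neg h1, reduceIte]; omega
            · intro x hx
              rcases List.mem_cons.mp hx with rfl | h
              · exact Or.inr rfl
              · exact hc x h
          · intro ⟨ha, hf, hc⟩
            refine ⟨?_, ?_, fun x hx => hc x (List.mem_cons_of_mem _ hx)⟩
            · intro k hk
              have := ha (k + 1) (by simpa using hk)
              rw [pvD_cons_succ] at this; simp only [if_neg h1, reduceIte] at this; omega
            · rw [List.length_cons, pvD_cons_succ] at hf
              simp only [if_neg h1, reduceIte] at hf; omega
      · simp only [pvOkB, if_neg h1, if_neg h2]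
        constructor
        · intro h; cases h
        · intro ⟨_, _, hc⟩
          rcases hc c (by simp) with h | h
          · exact absurd h h1
          · exact absurd h h2

-- ok strings are count-balanced
lemma pvOkB_d_zero (p : List Char) (h : pvOkB p 0 = true) : pvD p p.length = 0 := by
  have := (pvOkB_char p 0 le_rfl).mp h
  simpa using this.2.1

-- splitting an ok string at a balanced even prefix keeps both halves ok
lemma pvOkB_split (p : List Char) (cut : Nat) (hc : cut ≤ p.length)
    (hd : pvD p cut = 0) (h : pvOkB p 0 = true) :
    pvOkB (p.take cut) 0 = true ∧ pvOkB (p.drop cut) 0 = true := by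
  obtain ⟨ha, hf, hch⟩ := (pvOkB_char p 0 le_rfl).mp h
  constructor
  · rw [pvOkB_char _ 0 le_rfl]
    refine ⟨?_, ?_, fun c hcm => hch c (List.mem_of_mem_take hcm)⟩
    · intro k hk
      rw [List.length_take] at hk
      rw [pvD_take p cut k (by omega)]
      exact ha k (by omega)
    · rw [List.length_take, Nat.min_eq_left hc, pvD_take p cut cut le_rfl]
      simpa using hd
  · rw [pvOkB_char _ 0 le_rfl]
    refine ⟨?_, ?_, fun c hcm => hch c (List.mem_of_mem_drop hcm)⟩
    · intro k hk
      have := ha (cut + k) (by rw [List.length_drop] at hk; omega)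
      rw [pvD_add p cut hc k] at this
      omega
    · have := hf
      rw [show p.length = cut + (p.length - cut) by omega, pvD_add p cut hc] at this
      rw [List.length_drop]
      omega

-- ---- the cuts pass computes pvCutsSpec ----

lemma pvCutsB_eq (p : List Char) :
    pvCutsB p = (pvD p p.length, pvCutsSpec p) := by
  induction p using List.reverseRecOn with
  | nil => simp [pvCutsB, pvCutsSpec, pvD_zero, PySem.List.enumerate]
  | append_singleton xs c ih =>
    unfold pvCutsB at ih ⊢
    rw [PySem.List.enumerate_append, List.foldl_append, ih]
    have hlen : (xs ++ [c]).length = xs.length + 1 := by simp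
    have hD : ∀ k, k ≤ xs.length → pvD (xs ++ [c]) k = pvD xs k := by
      intro k hk
      unfold pvD
      rw [List.take_append_of_le_length hk]
    have hDnew : pvD (xs ++ [c]) (xs.length + 1) =
        pvD xs xs.length + (if c = '(' then 1 else if c = ')' then -1 else 0) := by
      unfold pvD
      rw [show xs.length + 1 = (xs ++ [c]).length by simp, List.take_length]
      rw [List.count_append, List.count_append]
      simp only [List.take_length, List.count_singleton]
      by_cases h1 : c = '(' <;> by_cases h2 : c = ')' <;> simp_all <;> push_cast <;> ring
    have hspec : pvCutsSpec (xs ++ [c]) =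
        pvCutsSpec xs ++
          (if pvD (xs ++ [c]) (xs.length + 1) = 0 ∧ (xs.length + 1) % 2 = 0
            then [xs.length + 1] else []) := by
      unfold pvCutsSpec
      rw [hlen, List.range_succ, List.filterMap_append]
      congr 1
      · apply List.filterMap_congr
        intro i hi
        rw [List.mem_range] at hi
        rw [hD (i + 1) (by omega)]
      · simp only [List.filterMap_cons, List.filterMap_nil]
        by_cases hcnd : pvD (xs ++ [c]) (xs.length + 1) = 0 ∧ (xs.length + 1) % 2 = 0
        · rw [if_pos hcnd]; simpa using hcnd
        · rw [if_neg hcnd]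
          simp
          intro h1
          have h2 : (xs.length + 1) % 2 ≠ 0 := fun he => hcnd ⟨h1, he⟩
          omega
    rw [hspec]
    simp only [PySem.List.enumerate, List.foldl_cons, List.foldl_nil]
    have hmod : PySem.Int.mod ((0 : Int) + xs.length) 2 = (xs.length % 2 : Nat) := by
      rw [zero_add]
      exact_mod_cast PySem.Int.mod_natCast xs.length 2
    have htn : (((0 : Int) + xs.length) + 1).toNat = xs.length + 1 := by omega
    by_cases hcond : pvD (xs ++ [c]) (xs.length + 1) = 0 ∧ (xs.length + 1) % 2 = 0
    · rw [if_pos hcond]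
      have : ((if c = '(' then pvD xs xs.length + 1
          else if c = ')' then pvD xs xs.length - 1 else pvD xs xs.length) = 0 ∧
          PySem.Int.mod ((0 : Int) + xs.length) 2 = 1) := by
        constructor
        · rw [hDnew] at hcond
          have := hcond.1
          by_cases h1 : c = '(' <;> by_cases h2 : c = ')' <;> simp_all <;> omega
        · rw [hmod]
          have := hcond.2
          norm_cast
          omega
      rw [if_pos this, hlen, hDnew, htn]
      simp only [Prod.mk.injEq]
      refine ⟨?_, by trivial⟩
      by_cases h1 : c = '(' <;> by_cases h2 : c = ')' <;> simp_all <;> ring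
    · rw [if_neg hcond]
      have : ¬((if c = '(' then pvD xs xs.length + 1
          else if c = ')' then pvD xs xs.length - 1 else pvD xs xs.length) = 0 ∧
          PySem.Int.mod ((0 : Int) + xs.length) 2 = 1) := by
        intro ⟨hA, hB⟩
        apply hcond
        constructor
        · rw [hDnew]
          by_cases h1 : c = '(' <;> by_cases h2 : c = ')' <;> simp_all <;> omega
        · rw [hmod] at hB
          norm_cast at hB
          omega
      rw [if_neg this, hlen, hDnew]
      simp only [Prod.mk.injEq]
      refine ⟨?_, by simp⟩
      by_cases h1 : c = '(' <;> by_cases h2 : c = ')' <;> simp_all <;> ring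

-- membership in the cut list
lemma pvCutsSpec_mem (p : List Char) (j : Nat) (h : j ∈ pvCutsSpec p) :
    pvD p j = 0 ∧ j % 2 = 0 ∧ 1 ≤ j ∧ j ≤ p.length := by
  unfold pvCutsSpec at h
  rw [List.mem_filterMap] at h
  obtain ⟨i, hi, hif⟩ := h
  rw [List.mem_range] at hi
  split at hif
  · rename_i hcond
    cases hif
    exact ⟨hcond.1, hcond.2, by omega, by omega⟩
  · cases hif

-- for a count-balanced even-length nonempty string the cuts end at len(p)
lemma pvCutsSpec_last (p : List Char) (hp : p ≠ [])
    (hev : p.length % 2 = 0) (hd : pvD p p.length = 0) :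
    pvCutsSpec p ≠ [] ∧ (pvCutsSpec p).getLast? = some p.length := by
  have hlen : 1 ≤ p.length := List.length_pos_iff.mpr hp
  have hsplit : pvCutsSpec p =
      ((List.range (p.length - 1)).filterMap
        (fun i => if pvD p (i + 1) = 0 ∧ (i + 1) % 2 = 0 then some (i + 1) else none))
        ++ [p.length] := by
    unfold pvCutsSpec
    rw [show p.length = (p.length - 1) + 1 by omega, List.range_succ, List.filterMap_append]
    congr 1
    simp only [List.filterMap_cons, List.filterMap_nil]
    rw [if_pos (by rw [show p.length - 1 + 1 = p.length by omega]; exact ⟨hd, hev⟩)]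
  rw [hsplit]
  exact ⟨by simp, by simp⟩

-- decomposition of the cut list at the least cut
lemma pvCutsSpec_decomp (p : List Char) (cut : Nat) (hcle : cut ≤ p.length)
    (h2 : 2 ≤ cut) (hev : cut % 2 = 0) (h0 : pvD p cut = 0)
    (hmin : ∀ k, k % 2 = 0 → 2 ≤ k → k < cut → pvD p k ≠ 0) :
    pvCutsSpec p = cut :: (pvCutsSpec (p.drop cut)).map (fun j => j + cut) := by
  unfold pvCutsSpec
  rw [show p.length = cut + (p.length - cut) by omega, List.range_add, List.filterMap_append]
  have hfirst : (List.range cut).filterMap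
      (fun i => if pvD p (i + 1) = 0 ∧ (i + 1) % 2 = 0 then some (i + 1) else none) = [cut] := by
    rw [show cut = (cut - 1) + 1 by omega, List.range_succ, List.filterMap_append]
    have hnil : (List.range (cut - 1)).filterMap
        (fun i => if pvD p (i + 1) = 0 ∧ (i + 1) % 2 = 0 then some (i + 1) else none) = [] := by
      rw [List.filterMap_eq_nil_iff]
      intro i hi
      rw [List.mem_range] at hi
      rw [if_neg]
      intro ⟨hd0, hev'⟩
      exact hmin (i + 1) hev' (by omega) (by omega) hd0
    rw [hnil]
    simp only [List.filterMap_cons, List.filterMap_nil, List.nil_append]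
    rw [show cut - 1 + 1 = cut by omega, if_pos ⟨h0, hev⟩]
  rw [hfirst, List.singleton_append]
  congr 1
  rw [List.filterMap_map]
  have hlenv : (p.drop cut).length = p.length - cut := by simp
  rw [hlenv]
  rw [List.map_filterMap]
  apply List.filterMap_congr
  intro i _
  have hDv : pvD p (cut + (i + 1)) = pvD (p.drop cut) (i + 1) := by
    rw [pvD_add p cut hcle (i + 1), h0]; ring
  simp only [Function.comp_apply]
  rw [show cut + i + 1 = cut + (i + 1) by omega, hDv]
  have hpar : (cut + (i + 1)) % 2 = (i + 1) % 2 := by omega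
  rw [hpar]
  split
  · simp only [Option.map_some]
    congr 1
    omega
  · simp

lemma pvGetLast?_cons_ne (a : Nat) (l : List Nat) (h : l ≠ []) :
    (a :: l).getLast? = l.getLast? := by
  cases l with
  | nil => exact absurd rfl h
  | cons b t => simp [List.getLast?_cons_cons]

-- B's block list: degenerate cases
lemma pvBlocksB_nil : pvBlocksB [] = [] := by
  simp [pvBlocksB, pvCutsB_eq, pvCutsSpec]

lemma pvBlocksB_single (p : List Char) (hp : p ≠ []) (hd : pvD p p.length ≠ 0) :
    pvBlocksB p = [p] := by
  unfold pvBlocksB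
  rw [pvCutsB_eq]
  simp only
  rw [if_neg, if_neg hp]
  intro ⟨_, hlast⟩
  have hmem : p.length ∈ pvCutsSpec p := by
    have := List.mem_of_getLast? (l := pvCutsSpec p) (a := p.length) hlast
    exact this
  exact hd (pvCutsSpec_mem p p.length hmem).1

-- B's block list: the head block splits off
lemma pvBlocksB_cons (p : List Char) (hp : p ≠ []) (hev : p.length % 2 = 0)
    (hd : pvD p p.length = 0) (cut : Nat) (hcle : cut ≤ p.length)
    (h2 : 2 ≤ cut) (hcev : cut % 2 = 0) (h0 : pvD p cut = 0)
    (hmin : ∀ k, k % 2 = 0 → 2 ≤ k → k < cut → pvD p k ≠ 0) :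
    pvBlocksB p = p.take cut :: pvBlocksB (p.drop cut) := by
  have hdecomp := pvCutsSpec_decomp p cut hcle h2 hcev h0 hmin
  have hlenv : (p.drop cut).length = p.length - cut := by simp
  have hdv : pvD (p.drop cut) (p.drop cut).length = 0 := by
    have := hd
    rw [show p.length = cut + (p.length - cut) by omega, pvD_add p cut hcle] at this
    rw [hlenv]; omega
  -- the slice map over shifted pairs is the slice map over v's pairs
  have hslice : ∀ (l1 l2 : List Nat),
      ((l1.map (fun j => j + cut)).zip (l2.map (fun j => j + cut))).map
        (fun ab => (p.take ab.2).drop ab.1) =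
      (l1.zip l2).map (fun ab => ((p.drop cut).take ab.2).drop ab.1) := by
    intro l1 l2
    rw [List.zip_map]
    rw [List.map_map]
    apply List.map_congr_left
    intro ab _
    simp only [Function.comp_apply, Prod.map]
    have htk : p.take (ab.2 + cut) = p.take cut ++ (p.drop cut).take ab.2 := by
      rw [show ab.2 + cut = cut + ab.2 by omega, List.take_add]
    rw [htk]
    have hlt : (p.take cut).length = cut := by simp; omega
    rw [show ab.1 + cut = (p.take cut).length + ab.1 by omega]
    rw [List.drop_append]
    have h1 : (p.take cut).drop ((p.take cut).length + ab.1) = [] :=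
      List.drop_eq_nil_of_le (by omega)
    rw [h1, List.nil_append]
    congr 1
    omega
  by_cases hv : p.drop cut = []
  · -- cut = len: single block, v empty
    have hcl : cut = p.length := by
      have := hlenv; rw [hv] at this; simp at this; omega
    have hspec0 : pvCutsSpec p = [cut] := by
      rw [hdecomp, hv]
      simp [pvCutsSpec]
    have hbv : pvBlocksB (p.drop cut) = [] := by rw [hv, pvBlocksB_nil]
    rw [hbv]
    unfold pvBlocksB
    rw [pvCutsB_eq]
    simp only
    rw [hspec0, if_pos ⟨by simp, by simp [hcl]⟩]
    simp
  · have hvev : (p.drop cut).length % 2 = 0 := by rw [hlenv]; omega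
    obtain ⟨hvne, hvlast⟩ := pvCutsSpec_last (p.drop cut) hv hvev hdv
    have hbv : pvBlocksB (p.drop cut) =
        ((0 :: pvCutsSpec (p.drop cut)).zip (pvCutsSpec (p.drop cut))).map
          (fun ab => ((p.drop cut).take ab.2).drop ab.1) := by
      unfold pvBlocksB
      rw [pvCutsB_eq]
      simp only
      rw [if_pos ⟨hvne, hvlast⟩]
    rw [hbv]
    unfold pvBlocksB
    rw [pvCutsB_eq]
    simp only
    have hglast : (cut :: (pvCutsSpec (p.drop cut)).map (fun j => j + cut)).getLast? =
        some p.length := by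
      rw [pvGetLast?_cons_ne _ _ (by simpa using hvne), List.getLast?_map, hvlast]
      simp only [Option.map_some]
      congr 1
      omega
    rw [hdecomp, if_pos ⟨by simp, hglast⟩]
    have hzip : (0 :: cut :: (pvCutsSpec (p.drop cut)).map (fun j => j + cut)).zip
        (cut :: (pvCutsSpec (p.drop cut)).map (fun j => j + cut)) =
        (0, cut) :: ((cut :: (pvCutsSpec (p.drop cut)).map (fun j => j + cut)).zip
          ((pvCutsSpec (p.drop cut)).map (fun j => j + cut))) := by
      simp [List.zip]
    rw [hzip]
    simp only [List.map_cons, List.drop_zero]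
    congr 1
    have hcons : cut :: (pvCutsSpec (p.drop cut)).map (fun j => j + cut) =
        (0 :: pvCutsSpec (p.drop cut)).map (fun j => j + cut) := by
      simp
    rw [hcons, hslice]

-- B's fold as a foldr
def pvF (u out : List Char) : List Char :=
  if pvOkB u 0 then u ++ out
  else '(' :: out ++ ')' ::
    ((u.drop 1).dropLast).map (fun c => if c = '(' then ')' else '(')

lemma pvSolB_foldr (p : List Char) :
    pvSolB p = (pvBlocksB p).foldr pvF [] := by
  unfold pvSolB pvF
  rw [List.foldl_reverse]

-- ===== main equivalence on lists: even length only =====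
lemma pvMain : ∀ (nn : Nat) (p : List Char), p.length ≤ nn → p.length % 2 = 0 →
    pvSolA p = pvSolB p := by
  intro nn
  induction nn with
  | zero =>
    intro p hlen _
    have hp : p = [] := List.length_eq_zero_iff.mp (by omega)
    rw [hp, pvSolA, pvSolB_foldr, pvBlocksB_nil]
    simp
  | succ nn ih =>
    intro p hlen hev
    by_cases hne : p = []
    · rw [hne, pvSolA, pvSolB_foldr, pvBlocksB_nil]; simp
    · have hn2 : 2 ≤ p.length := by
        have : 0 < p.length := List.length_pos_iff.mpr hne
        omega
      have hok_eq : pvIsRightA p = pvOkB p 0 := pvIsRightA_eq_okB p hne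
      by_cases hdz : pvD p p.length = 0
      · -- count-balanced: the head block splits off at the least even balanced cut
        haveI : DecidablePred (fun k => k % 2 = 0 ∧ 2 ≤ k ∧ pvD p k = 0) :=
          fun k => by infer_instance
        have hex : ∃ k, k % 2 = 0 ∧ 2 ≤ k ∧ pvD p k = 0 := ⟨p.length, hev, hn2, hdz⟩
        set cut := Nat.find hex with hcutdef
        obtain ⟨hcutev, hcut2, hcut0⟩ := Nat.find_spec hex
        have hcutlen : cut ≤ p.length := Nat.find_le ⟨hev, hn2, hdz⟩
        have hmin : ∀ k, k % 2 = 0 → 2 ≤ k → k < cut → pvD p k ≠ 0 := by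
          intro k h1 h2 h3 hd
          exact Nat.find_min hex h3 ⟨h1, h2, hd⟩
        have hBblocks := pvBlocksB_cons p hne hev hdz cut hcutlen hcut2 hcutev hcut0 hmin
        -- recursion data for v
        have hlenv : (p.drop cut).length ≤ nn := by simp; omega
        have hevv : (p.drop cut).length % 2 = 0 := by simp; omega
        have hIH : pvSolA (p.drop cut) = pvSolB (p.drop cut) := ih _ hlenv hevv
        have hBstep : pvSolB p = pvF (p.take cut) (pvSolB (p.drop cut)) := by
          rw [pvSolB_foldr, hBblocks, List.foldr_cons, ← pvSolB_foldr]
        have hune : p.take cut ≠ [] := by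
          intro hnil
          have : (p.take cut).length = cut := by simp; omega
          rw [hnil] at this; simp at this; omega
        have hu_eq : pvIsRightA (p.take cut) = pvOkB (p.take cut) 0 :=
          pvIsRightA_eq_okB _ hune
        by_cases hr : pvIsRightA p = true
        · -- A returns p; B's fold rebuilds it
          have hokp : pvOkB p 0 = true := by rw [← hok_eq]; exact hr
          obtain ⟨hoku, hokv⟩ := pvOkB_split p cut hcutlen hcut0 hokp
          have hvA : pvSolA (p.drop cut) = p.drop cut := by
            by_cases hv : p.drop cut = []
            · rw [hv, pvSolA]; simp
            · rw [pvSolA, dif_pos (Or.inr (by rw [pvIsRightA_eq_okB _ hv]; exact hokv))]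
          rw [pvSolA, dif_pos (Or.inr hr), hBstep, pvF, if_pos hoku, ← hIH, hvA]
          exact (List.take_append_drop cut p).symm
        · -- both take the splitting path
          have hCnd : pvCnd p cut := (pvCnd_iff p cut hcutlen).mpr ⟨hcut0, hdz⟩
          have hminC : ∀ k, k % 2 = 0 → 2 ≤ k → k < cut → ¬ pvCnd p k := by
            intro k h1 h2 h3 hC
            have hk : k ≤ p.length := by omega
            exact hmin k h1 h2 h3 ((pvCnd_iff p k hk).mp hC).1
          have hA := pvLoopA_spec p cut hn2 hev hcut2 hcutlen hcutev (Or.inl hCnd) hminC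
          rw [pvSolA, dif_neg (by simp [hne, hr])]
          simp only [hA]
          rw [hBstep, pvF]
          by_cases hu : pvIsRightA (p.take cut) = true
          · rw [if_pos hu, if_pos (by rw [← hu_eq]; exact hu), hIH]
          · rw [if_neg hu, if_neg (by rw [← hu_eq]; exact hu)]
            rw [PySem.List.foldl_pyRange_zero_pyGetD' (((p.take cut).drop 1).dropLast) ' '
              (fun acc c => acc ++ [if c = '(' then ')' else '('])
              ('(' :: pvSolA (p.drop cut) ++ [')'])]
            rw [PySem.List.foldl_append_singleton_eq_map]
            rw [hIH]
            simp
      · -- not count-balanced: A falls through to u = p, v = ""; B keeps one block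
        have hrF : pvIsRightA p ≠ true := by
          rw [hok_eq]
          intro hok
          exact hdz (pvOkB_d_zero p hok)
        have hnoCnd : ∀ k, k ≤ p.length → ¬ pvCnd p k := by
          intro k hk hC
          exact hdz ((pvCnd_iff p k hk).mp hC).2
        have hA := pvLoopA_spec p p.length hn2 hev hn2 le_rfl hev (Or.inr rfl)
          (fun k _ _ h3 => hnoCnd k (by omega))
        rw [pvSolA, dif_neg (by simp [hne, hrF])]
        simp only [hA, List.take_length, List.drop_length]
        have hokF : pvOkB p 0 ≠ true := by
          intro hok; exact hdz (pvOkB_d_zero p hok)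
        rw [if_neg hrF]
        rw [pvSolB_foldr, pvBlocksB_single p hne hdz]
        simp only [List.foldr_cons, List.foldr_nil, pvF, if_neg hokF]
        rw [PySem.List.foldl_pyRange_zero_pyGetD' ((p.drop 1).dropLast) ' '
          (fun acc c => acc ++ [if c = '(' then ')' else '('])
          ('(' :: pvSolA [] ++ [')'])]
        rw [PySem.List.foldl_append_singleton_eq_map]
        rw [pvSolA]
        simp

-- ===== VERDICT (by name: the statements are the Claim_ definitions above) =====
theorem solution_spec : Claim_equal_solution := by
  intro p _ hpre
  unfold Spec_solution solution solution_alt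
  rw [pvMain p.toList.length p.toList le_rfl hpre]
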